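-- pv_equiv track=rewrite | github.com/konradarchicinski/pybox | pybox/datastore/data_to_html.py | _add_dotted_row
-- ===== SOURCE A (Python) =====
-- def _add_dotted_row(html_table_fragment, data_map):
--     """Return a string containing the table row in html format with dotted cells.
--
--     Args:
--         html_table_fragment (str): fragment of the html table.
--         data_map (list): list of sublists containing sequentially:
--             the name of the column (str),
--             the index representing the column position in the array (int),
--             the data type appearing in the column (type).
--     """
--     html_table_fragment = "".join(
--         [html_table_fragment, "<tr>\n<td>...</td>\n"])
--     for _ in data_map:
--         html_table_fragment = "".join(
--             [html_table_fragment, "<td style='text-align:left;'>...</td>\n"])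
--     html_table_fragment = "".join([html_table_fragment, "</tr>\n"])
--     return html_table_fragment
-- ===== SOURCE B (Python) =====
-- def _add_dotted_row(html_table_fragment, data_map):
--     """Closed form: one dotted cell per entry, no loop."""
--     return (html_table_fragment
--             + "<tr>\n<td>...</td>\n"
--             + "<td style='text-align:left;'>...</td>\n" * len(data_map)
--             + "</tr>\n")
-- ===== Notes on version B (the rewrite author's own statement) =====
-- stated objective: simpler
-- what changed: Replaces the accumulate-in-a-loop joins with a single closed-form expression: fragment + row head + the constant cell string repeated len(data_map) times + row tail.
import Mathlib
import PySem

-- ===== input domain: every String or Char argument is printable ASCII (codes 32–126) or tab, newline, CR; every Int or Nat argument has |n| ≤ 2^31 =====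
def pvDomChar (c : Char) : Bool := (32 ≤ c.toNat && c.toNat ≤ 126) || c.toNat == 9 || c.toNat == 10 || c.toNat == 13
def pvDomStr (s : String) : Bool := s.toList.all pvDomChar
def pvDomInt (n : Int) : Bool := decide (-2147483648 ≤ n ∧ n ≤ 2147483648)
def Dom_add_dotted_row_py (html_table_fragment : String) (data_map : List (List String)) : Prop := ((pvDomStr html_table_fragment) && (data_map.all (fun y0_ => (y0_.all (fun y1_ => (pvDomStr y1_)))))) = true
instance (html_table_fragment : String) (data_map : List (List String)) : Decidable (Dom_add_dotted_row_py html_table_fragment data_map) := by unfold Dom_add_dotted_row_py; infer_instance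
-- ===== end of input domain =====

-- B: closed-form row string (fragment + head + cell repeated len(data_map) times + tail) instead of A's loop of joins; simpler.


-- ===== PORT A =====
-- literal port of A: join head, then loop appending a cell per element, then join tail
def add_dotted_row_py (html_table_fragment : String) (data_map : List (List String)) : String :=
  let s := html_table_fragment ++ "<tr>\n<td>...</td>\n"
  let s := data_map.foldl (fun acc _ => acc ++ "<td style='text-align:left;'>...</td>\n") s
  s ++ "</tr>\n"

-- ===== PORT B =====
-- port of B: Python's `str * n` as repetition
def pvStrRepeat (s : String) : Nat → String
  | 0 => ""
  | n + 1 => s ++ pvStrRepeat s n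

def add_dotted_row_py_alt (html_table_fragment : String) (data_map : List (List String)) : String :=
  html_table_fragment ++ "<tr>\n<td>...</td>\n"
    ++ pvStrRepeat "<td style='text-align:left;'>...</td>\n" data_map.length
    ++ "</tr>\n"

-- ===== PRECONDITION & SPEC =====
def Spec_add_dotted_row_py (html_table_fragment : String) (data_map : List (List String)) (out : String) : Prop := out = add_dotted_row_py_alt html_table_fragment data_map
instance (html_table_fragment : String) (data_map : List (List String)) (out : String) : Decidable (Spec_add_dotted_row_py html_table_fragment data_map out) := by unfold Spec_add_dotted_row_py; infer_instance

-- ===== CLAIM (what is proved, stated in full; the proofs are below) =====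
def Claim_equal_add_dotted_row_py : Prop := ∀ (html_table_fragment : String) (data_map : List (List String)), Dom_add_dotted_row_py html_table_fragment data_map → Spec_add_dotted_row_py html_table_fragment data_map (add_dotted_row_py html_table_fragment data_map)

-- ===== LEMMAS AND PROOFS =====

-- ===== VERDICT (by name: the statement is the Claim_ definition above) =====
theorem foldl_append_eq_repeat (cell : String) (l : List (List String)) (s : String) :
    l.foldl (fun acc _ => acc ++ cell) s = s ++ pvStrRepeat cell l.length := by
  induction l generalizing s with
  | nil => simp [pvStrRepeat]
  | cons h t ih =>
      simp only [List.foldl_cons, List.length_cons, ih, pvStrRepeat]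
      rw [String.append_assoc]

theorem add_dotted_row_py_spec : Claim_equal_add_dotted_row_py := by
  intro f d _
  unfold Spec_add_dotted_row_py add_dotted_row_py add_dotted_row_py_alt
  simp only [foldl_append_eq_repeat, String.append_assoc]
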